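-- pv_equiv track=rewrite | github.com/andrefisch/EvanProjects | cmaShipping/splitNames.py | remove_end_space
-- ===== SOURCE A (Python) =====
-- def remove_end_space(string, num):
--     string2 = string[::-1]
--     count = 0
--     index = 0
--     for i in range(0, len(string2)):
--         if string2[i] != " ":
--             count += 1
--         if count >= num:
--             index = i
--             break
--     first = string2[index:]
--     second = string2[:index]
--     second = second.replace(" ", "")
--     return (second + first)[::-1]
-- ===== SOURCE B (Python) =====
-- def remove_end_space(string, num):
--     # Find the position of the num-th non-space character from the end directly
--     # (no string reversals), then keep everything up to and including it and
--     # strip spaces from the remainder.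
--     if num <= 0:
--         return string
--     nonspace = [j for j, c in enumerate(string) if c != " "]
--     if num > len(nonspace):
--         return string
--     split = nonspace[len(nonspace) - num] + 1
--     return string[:split] + "".join(c for c in string[split:] if c != " ")
-- ===== Notes on version B (the rewrite author's own statement) =====
-- stated objective: simpler
-- what changed: B never reverses the string: it collects the indices of non-space characters in one forward comprehension, picks the num-th from the end to get the split point, and strips spaces from the suffix, replacing A's two full reversals, indexed break-loop and reversed-slice replace.
import Mathlib
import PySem

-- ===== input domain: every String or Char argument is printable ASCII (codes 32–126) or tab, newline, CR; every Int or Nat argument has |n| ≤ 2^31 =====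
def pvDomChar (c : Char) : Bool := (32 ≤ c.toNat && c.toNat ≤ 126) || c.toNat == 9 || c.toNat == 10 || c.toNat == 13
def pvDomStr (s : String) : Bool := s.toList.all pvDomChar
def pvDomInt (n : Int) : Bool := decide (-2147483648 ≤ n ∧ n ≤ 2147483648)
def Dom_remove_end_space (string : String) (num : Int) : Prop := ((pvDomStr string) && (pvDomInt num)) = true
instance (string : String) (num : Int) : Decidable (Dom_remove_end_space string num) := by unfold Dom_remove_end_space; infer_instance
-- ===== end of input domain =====

-- B removes both string reversals of A: one forward pass collects non-space positions,
-- the split point is read off directly, and the suffix is filtered (objective: simpler).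

-- ===== PORT A =====
-- the for-i-in-range loop with break: walks string2's chars carrying i and count;
-- returns the break index, or 0 (the initial value of `index`) if the loop falls through
def pvAGo (l : List Char) (i count num : Int) : Int :=
  match l with
  | [] => 0
  | c :: rest =>
    let count := if c ≠ ' ' then count + 1 else count
    if count ≥ num then i else pvAGo rest (i + 1) count num

def remove_end_space (string : String) (num : Int) : String :=
  let string2 := string.toList.reverse                       -- string[::-1]
  let index := pvAGo string2 0 0 num
  let first := PySem.List.slice string2 (some index) none    -- string2[index:]
  let second := PySem.List.slice string2 none (some index)   -- string2[:index]
  let second := PySem.Chars.replace second [' '] []          -- second.replace(" ", "")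
  String.ofList (second ++ first).reverse                    -- (second + first)[::-1]

-- ===== PORT B =====
def remove_end_space_alt (string : String) (num : Int) : String :=
  if num ≤ 0 then string
  else
    let l := string.toList
    -- [j for j, c in enumerate(string) if c != " "]
    let nonspace := (PySem.List.enumerate l 0).foldl
      (fun acc p => if p.2 ≠ ' ' then acc ++ [p.1] else acc) []
    if num > (nonspace.length : Int) then string
    else
      let split := PySem.List.pyGetD nonspace ((nonspace.length : Int) - num) 0 + 1
      -- string[:split] + "".join(c for c in string[split:] if c != " ")
      String.ofList (PySem.List.slice l none (some split) ++
        (PySem.List.slice l (some split) none).filter (· ≠ ' '))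

-- ===== PRECONDITION & SPEC =====
def Spec_remove_end_space (string : String) (num : Int) (out : String) : Prop := out = remove_end_space_alt string num
instance (string : String) (num : Int) (out : String) : Decidable (Spec_remove_end_space string num out) := by unfold Spec_remove_end_space; infer_instance

-- ===== CLAIM (what is proved, stated in full; the proofs are below) =====
def Claim_equal_remove_end_space : Prop := ∀ (string : String) (num : Int), Dom_remove_end_space string num → Spec_remove_end_space string num (remove_end_space string num)

-- ===== LEMMAS AND PROOFS =====

-- positions (as Ints) of the non-space characters of a list
def nsp : List Char → List Int
  | [] => []
  | c :: rest => (if c ≠ ' ' then [(0 : Int)] else []) ++ (nsp rest).map (· + 1)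

theorem nsp_mem_bound {l : List Char} {j : Int} (h : j ∈ nsp l) : 0 ≤ j ∧ j < (l.length : Int) := by
  induction l generalizing j with
  | nil => simp [nsp] at h
  | cons c rest ih =>
    simp only [nsp, List.mem_append, List.mem_map] at h
    rcases h with h | ⟨k, hk, rfl⟩
    · split at h <;> simp_all
    · have := ih hk
      simp only [List.length_cons]
      push_cast
      omega

-- B's comprehension over enumerate yields exactly nsp, shifted by the start index
theorem enumerate_filter_map (l : List Char) (s : Int) :
    (((PySem.List.enumerate l s).filter (fun p => decide (p.2 ≠ ' '))).map (·.1)) =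
      (nsp l).map (· + s) := by
  induction l generalizing s with
  | nil => simp [PySem.List.enumerate, nsp]
  | cons c rest ih =>
    have hmap : (fun j : Int => j + 1 + s) = (fun j : Int => j + (s + 1)) := by
      funext j; ring
    by_cases hc : c = ' ' <;>
      simp [PySem.List.enumerate_cons, nsp, hc, List.map_map, Function.comp_def, hmap] <;>
      simpa using ih (s + 1)

theorem nsp_append_singleton (l : List Char) (c : Char) :
    nsp (l ++ [c]) = nsp l ++ (if c ≠ ' ' then [(l.length : Int)] else []) := by
  induction l with
  | nil => by_cases hc : c = ' ' <;> simp [nsp, hc]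
  | cons d t ih =>
    simp only [List.cons_append, nsp, ih]
    by_cases hc : c = ' ' <;> by_cases hd : d = ' ' <;>
      simp [hc, hd, List.map_append]

theorem nsp_reverse (l : List Char) :
    nsp l.reverse = ((nsp l).map (fun j => (l.length : Int) - 1 - j)).reverse := by
  induction l with
  | nil => simp [nsp]
  | cons c t ih =>
    by_cases hc : c = ' ' <;>
      simp [nsp, hc, nsp_append_singleton, ih, List.map_map, List.length_cons] <;>
      (intro a _; ring)

-- A's break-loop finds the (num-count)-th non-space position (offset by i), else 0
theorem pvAGo_eq (m : List Char) (i count num : Int) (h : count < num) :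
    pvAGo m i count num =
      match (nsp m)[(num - count - 1).toNat]? with
      | some p => i + p
      | none => 0 := by
  induction m generalizing i count with
  | nil => simp [pvAGo, nsp]
  | cons c rest ih =>
    by_cases hc : c = ' '
    · simp only [pvAGo, hc, ne_eq, not_true_eq_false, if_false]
      rw [if_neg (by omega : ¬ count ≥ num), ih (i + 1) count h]
      simp only [nsp, ne_eq, not_true_eq_false, if_false, List.nil_append,
        List.getElem?_map]
      cases (nsp rest)[(num - count - 1).toNat]? with
      | none => simp
      | some p => simp; ring
    · by_cases hge : count + 1 ≥ num
      · have hnum : num = count + 1 := by omega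
        simp [pvAGo, hc, hnum, nsp]
      · have hk : (num - count - 1).toNat = (num - (count + 1) - 1).toNat + 1 := by omega
        simp only [pvAGo, hc, ne_eq, not_false_eq_true, if_true]
        rw [if_neg hge, ih (i + 1) (count + 1) (by omega)]
        simp only [nsp, hc, ne_eq, not_false_eq_true, if_true, List.singleton_append, hk,
          List.getElem?_cons_succ, List.getElem?_map]
        cases (nsp rest)[(num - (count + 1) - 1).toNat]? with
        | none => simp
        | some p => simp; ring

theorem replace_go_filter (fuel : Nat) (l acc : List Char) (h : l.length ≤ fuel) :
    PySem.Chars.replace.go [' '] [] fuel l acc = acc.reverse ++ l.filter (· ≠ ' ') := by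
  induction fuel generalizing l acc with
  | zero =>
    have : l = [] := by cases l <;> simp_all
    subst this; rw [PySem.Chars.replace.go.eq_def]; simp
  | succ fuel ih =>
    cases l with
    | nil => rw [PySem.Chars.replace.go.eq_def]; simp
    | cons c t =>
      have h' : t.length ≤ fuel := by simp at h; omega
      by_cases hc : c = ' '
      · subst hc
        have hgo : PySem.Chars.replace.go [' '] [] (fuel + 1) (' ' :: t) acc =
            PySem.Chars.replace.go [' '] [] fuel t acc := by
          rw [PySem.Chars.replace.go.eq_def]; simp [List.isPrefixOf]
        rw [hgo, ih t acc h']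
        simp
      · have hgo : PySem.Chars.replace.go [' '] [] (fuel + 1) (c :: t) acc =
            PySem.Chars.replace.go [' '] [] fuel t (c :: acc) := by
          rw [PySem.Chars.replace.go.eq_def]
          simp [List.isPrefixOf]
          intro hh
          exact absurd hh.symm hc
        rw [hgo, ih t (c :: acc) h']
        simp [hc]

theorem replace_filter (s : List Char) :
    PySem.Chars.replace s [' '] [] = s.filter (· ≠ ' ') := by
  unfold PySem.Chars.replace
  rw [if_neg (by simp)]
  simpa using replace_go_filter s.length s [] le_rfl

theorem pvAGo_nonpos (m : List Char) (num : Int) (h : num ≤ 0) :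
    pvAGo m 0 0 num = 0 := by
  cases m with
  | nil => simp [pvAGo]
  | cons c rest => simp only [pvAGo]; split_ifs <;> first | rfl | omega

theorem remove_end_space_spec : Claim_equal_remove_end_space := by
  unfold Claim_equal_remove_end_space
  intro string num _
  unfold Spec_remove_end_space remove_end_space remove_end_space_alt
  have hns : ((PySem.List.enumerate string.toList 0).foldl
      (fun acc p => if p.2 ≠ ' ' then acc ++ [p.1] else acc) []) = nsp string.toList := by
    rw [PySem.List.foldl_append_ite (fun p : Int × Char => p.2 ≠ ' ') (fun p => p.1)]
    simpa using enumerate_filter_map string.toList 0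
  by_cases hnum : num ≤ 0
  · -- the loop breaks at i = 0 (or never runs): index = 0, the string is unchanged
    simp only [pvAGo_nonpos string.toList.reverse num hnum,
      PySem.List.slice_from string.toList.reverse (le_refl (0 : Int)),
      PySem.List.slice_to string.toList.reverse (le_refl (0 : Int)),
      Int.toNat_zero, List.drop_zero, List.take_zero, replace_filter,
      List.filter_nil, List.nil_append, List.reverse_reverse, String.ofList_toList,
      if_pos hnum]
  · have hA := pvAGo_eq string.toList.reverse 0 0 num (by omega)
    rw [nsp_reverse] at hA
    by_cases hbig : ((nsp string.toList).length : Int) < num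
    · -- more non-spaces asked for than exist: the loop falls through, index stays 0
      have hnone : (((nsp string.toList).map
          (fun j => (string.toList.length : Int) - 1 - j)).reverse)[(num - 0 - 1).toNat]? = none := by
        rw [List.getElem?_eq_none_iff]
        simp only [List.length_reverse, List.length_map]
        omega
      rw [hnone] at hA
      simp only [hA,
        PySem.List.slice_from string.toList.reverse (le_refl (0 : Int)),
        PySem.List.slice_to string.toList.reverse (le_refl (0 : Int)),
        Int.toNat_zero, List.drop_zero, List.take_zero, replace_filter,
        List.filter_nil, List.nil_append, List.reverse_reverse, String.ofList_toList,
        if_neg hnum, hns, if_pos (show ((nsp string.toList).length : Int) < num from hbig)]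
    · -- main case: 1 ≤ num ≤ number of non-spaces
      have hk : (num - 0 - 1).toNat < (nsp string.toList).length := by omega
      have hi0 : (nsp string.toList).length - 1 - (num - 0 - 1).toNat <
          (nsp string.toList).length := by omega
      have hidx : (((nsp string.toList).map
          (fun j => (string.toList.length : Int) - 1 - j)).reverse)[(num - 0 - 1).toNat]? =
          some ((string.toList.length : Int) - 1 -
            (nsp string.toList)[(nsp string.toList).length - 1 - (num - 0 - 1).toNat]) := by
        rw [List.getElem?_reverse (by simpa using hk)]
        simp only [List.length_map, List.getElem?_map]
        rw [List.getElem?_eq_getElem hi0]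
        rfl
      rw [hidx] at hA
      have hjb := nsp_mem_bound (List.getElem_mem hi0)
      set j := (nsp string.toList)[(nsp string.toList).length - 1 - (num - 0 - 1).toNat] with hj
      have hA' : pvAGo string.toList.reverse 0 0 num = (string.toList.length : Int) - 1 - j := by
        rw [hA]
        exact zero_add _
      have hge : (0 : Int) ≤ (string.toList.length : Int) - 1 - j := by omega
      have htn : ((string.toList.length : Int) - 1 - j).toNat =
          string.toList.length - 1 - j.toNat := by omega
      have hm : string.toList.length - (string.toList.length - 1 - j.toNat) = j.toNat + 1 := by
        omega
      -- B's split index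
      have hLn : ((nsp string.toList).length : Int) - num =
          (((nsp string.toList).length - 1 - (num - 0 - 1).toNat : Nat) : Int) := by
        omega
      have hget : PySem.List.pyGetD (nsp string.toList)
          (((nsp string.toList).length : Int) - num) 0 = j := by
        rw [hLn, PySem.List.pyGetD_natCast, List.getD_eq_getElem?_getD,
          List.getElem?_eq_getElem hi0]
        rfl
      have hsplit : (0 : Int) ≤ j + 1 := by omega
      have hsplittn : (j + 1).toNat = j.toNat + 1 := by omega
      simp only [hA', hns, if_neg hnum, if_neg hbig, hget,
        PySem.List.slice_from string.toList.reverse hge,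
        PySem.List.slice_to string.toList.reverse hge,
        PySem.List.slice_from string.toList hsplit,
        PySem.List.slice_to string.toList hsplit,
        htn, hsplittn, replace_filter,
        List.drop_reverse, List.take_reverse, hm,
        List.filter_reverse, List.reverse_append, List.reverse_reverse]
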